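-- pv_equiv track=rewrite | github.com/ZhixinHan/DEQA | DEQA/models/models.py | insert_tags_around_sequence
-- ===== SOURCE A (Python) =====
-- def insert_tags_around_sequence(lst, sequence, occurrence):
--     length = len(sequence)
--     count = 0
--
--     i = 0
--     while i <= len(lst) - length:
--         if lst[i:i + length] == sequence:
--             count += 1
--             if count == occurrence:
--                 lst.insert(i, '<target>')
--                 lst.insert(i + length + 1, '</target>')
--                 break
--         i += 1
--
--     return lst
-- ===== SOURCE B (Python) =====
-- def insert_tags_around_sequence(lst, sequence, occurrence):
--     m = len(sequence)
--     n = len(lst)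
--     if m == 0:
--         if 1 <= occurrence <= n + 1:
--             i = occurrence - 1
--             lst[:] = lst[:i] + ['<target>', '</target>'] + lst[i:]
--         return lst
--     # KMP failure table
--     fail = [0] * m
--     k = 0
--     for q in range(1, m):
--         while k > 0 and sequence[q] != sequence[k]:
--             k = fail[k - 1]
--         if sequence[q] == sequence[k]:
--             k += 1
--         fail[q] = k
--     # single left-to-right scan, automaton state q = matched prefix length
--     count = 0
--     q = 0
--     for i in range(n):
--         while q > 0 and lst[i] != sequence[q]:
--             q = fail[q - 1]
--         if lst[i] == sequence[q]:
--             q += 1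
--         if q == m:
--             count += 1
--             if count == occurrence:
--                 s = i - m + 1
--                 lst[:] = (lst[:s] + ['<target>'] + lst[s:s + m]
--                           + ['</target>'] + lst[s + m:])
--                 return lst
--             q = fail[q - 1]
--     return lst
-- ===== Notes on version B (the rewrite author's own statement) =====
-- stated objective: alternative
-- what changed: A recompares the whole window at every start position with a mutable counter and in-place inserts; B runs Knuth-Morris-Pratt: it precomputes the failure table of the sequence, scans the list once with an automaton state (length of the matched prefix), counts matches and splices the tags in at the nth one.
import Mathlib
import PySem

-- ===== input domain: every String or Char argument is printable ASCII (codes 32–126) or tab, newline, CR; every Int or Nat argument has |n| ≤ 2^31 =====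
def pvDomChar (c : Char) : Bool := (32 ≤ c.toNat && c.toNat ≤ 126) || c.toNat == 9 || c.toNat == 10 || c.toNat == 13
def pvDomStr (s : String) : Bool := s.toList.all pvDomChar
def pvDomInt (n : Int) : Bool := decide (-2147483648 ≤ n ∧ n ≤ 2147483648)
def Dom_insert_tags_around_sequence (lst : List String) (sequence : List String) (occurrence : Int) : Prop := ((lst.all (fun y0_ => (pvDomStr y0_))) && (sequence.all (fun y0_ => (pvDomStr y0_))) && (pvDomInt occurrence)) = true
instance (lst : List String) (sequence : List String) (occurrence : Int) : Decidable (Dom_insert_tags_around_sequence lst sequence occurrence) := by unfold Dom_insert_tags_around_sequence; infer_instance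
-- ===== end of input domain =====

-- B replaces A's restart-from-scratch window scan (recompare the whole window at every
-- start position) by Knuth–Morris–Pratt: a precomputed failure table and a single
-- left-to-right pass that never re-reads a consumed element (objective: alternative).
-- Both Pythons mutate lst in place to the same final state; the equivalence proved here
-- is about the return value.

-- ===== PORT A =====
-- A's while loop, step for step: i is the cursor, count the number of matches seen so far
def pvALoop (lst : List String) (sequence : List String) (occurrence : Int) (count : Int) (i : Nat) : List String :=
  if h : (i : Int) ≤ (lst.length : Int) - (sequence.length : Int) then
    if PySem.List.slice lst (some (i : Int)) (some ((i : Int) + (sequence.length : Int))) == sequence then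
      if count + 1 == occurrence then
        PySem.List.insert (PySem.List.insert lst (i : Int) "<target>")
          ((i : Int) + (sequence.length : Int) + 1) "</target>"
      else pvALoop lst sequence occurrence (count + 1) (i + 1)
    else pvALoop lst sequence occurrence count (i + 1)
  else lst
termination_by lst.length + 1 - i
decreasing_by all_goals omega

def insert_tags_around_sequence (lst : List String) (sequence : List String) (occurrence : Int) : List String :=
  pvALoop lst sequence occurrence 0 0

-- ===== PORT B =====
-- the inner 'while k > 0 and c != p[k]: k = fail[k-1]' of Source B.  The fuel argument is a
-- totality guard only: every step strictly decreases k (fail entries satisfy fail[j] ≤ j,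
-- proved below), so calling it with fuel = k computes exactly what Python's while computes.
-- p.getD k "" is Python's p[k]: every access is in range on every reachable state.
def pvKmpShift (p : List String) (fail : List Nat) (c : String) : Nat → Nat → Nat
  | k, 0 => k
  | k, fuel+1 =>
    if 0 < k ∧ ¬(c == p.getD k "") then pvKmpShift p fail c (fail.getD (k-1) 0) fuel else k

-- the while followed by 'if c == p[k]: k += 1' (this statement pair occurs verbatim in
-- both of Source B's loops)
def pvQ2 (p : List String) (fail : List Nat) (c : String) (q : Nat) : Nat :=
  if c == p.getD (pvKmpShift p fail c q q) "" then pvKmpShift p fail c q q + 1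
  else pvKmpShift p fail c q q

-- one iteration of Source B's failure-table loop: state = (fail, k), sets fail[q]
def pvBuildStep (p : List String) (st : List Nat × Nat) (q : Nat) : List Nat × Nat :=
  let k2 := pvQ2 p st.1 (p.getD q "") st.2
  (st.1.set q k2, k2)

-- fail = [0]*m; for q in range(1, m): ...
def pvBuildFail (p : List String) : List Nat :=
  ((List.range' 1 (p.length - 1)).foldl (pvBuildStep p) (List.replicate p.length 0, 0)).1

-- Source B's main scan: for i in range(n), automaton state q, count of matches so far
def pvKmpLoop (lst p : List String) (fail : List Nat) (occurrence : Int) (i q : Nat) (count : Int) : List String :=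
  if h : i < lst.length then
    let q2 := pvQ2 p fail (lst.getD i "") q
    if q2 == p.length then
      if count + 1 == occurrence then
        PySem.List.slice lst none (some ((i : Int) - (p.length : Int) + 1)) ++ ["<target>"] ++
          PySem.List.slice lst (some ((i : Int) - (p.length : Int) + 1))
            (some ((i : Int) - (p.length : Int) + 1 + (p.length : Int))) ++ ["</target>"] ++
          PySem.List.slice lst (some ((i : Int) - (p.length : Int) + 1 + (p.length : Int))) none
      else pvKmpLoop lst p fail occurrence (i+1) (fail.getD (p.length - 1) 0) (count + 1)
    else pvKmpLoop lst p fail occurrence (i+1) q2 count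
  else lst
termination_by lst.length - i
decreasing_by all_goals omega

def insert_tags_around_sequence_alt (lst : List String) (sequence : List String) (occurrence : Int) : List String :=
  if sequence.length == 0 then
    if 1 ≤ occurrence ∧ occurrence ≤ (lst.length : Int) + 1 then
      PySem.List.slice lst none (some (occurrence - 1)) ++ ["<target>", "</target>"] ++
        PySem.List.slice lst (some (occurrence - 1)) none
    else lst
  else
    pvKmpLoop lst sequence (pvBuildFail sequence) occurrence 0 0 0

-- ===== PRECONDITION & SPEC =====
def Spec_insert_tags_around_sequence (lst : List String) (sequence : List String) (occurrence : Int) (out : List String) : Prop := out = insert_tags_around_sequence_alt lst sequence occurrence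
instance (lst : List String) (sequence : List String) (occurrence : Int) (out : List String) : Decidable (Spec_insert_tags_around_sequence lst sequence occurrence out) := by unfold Spec_insert_tags_around_sequence; infer_instance

-- ===== CLAIM (what is proved, stated in full; the proofs are below) =====
def Claim_equal_insert_tags_around_sequence : Prop := ∀ (lst : List String) (sequence : List String) (occurrence : Int), Dom_insert_tags_around_sequence lst sequence occurrence → Spec_insert_tags_around_sequence lst sequence occurrence (insert_tags_around_sequence lst sequence occurrence)

-- ===== LEMMAS AND PROOFS =====

-- ---------- characterisation of A (as in a naive scan): list of match positions ----------

-- positions j ≥ i at which sequence occurs in lst, in increasing order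
def pvHitsFrom (lst : List String) (sequence : List String) (i : Nat) : List Nat :=
  if h : (i : Int) ≤ (lst.length : Int) - (sequence.length : Int) then
    (if PySem.List.slice lst (some (i : Int)) (some ((i : Int) + (sequence.length : Int))) == sequence
      then [i] else []) ++ pvHitsFrom lst sequence (i + 1)
  else []
termination_by lst.length + 1 - i
decreasing_by omega

-- the value A builds when it fires at position j
def pvTagAt (lst : List String) (sequence : List String) (j : Nat) : List String :=
  PySem.List.insert (PySem.List.insert lst (j : Int) "<target>")
    ((j : Int) + (sequence.length : Int) + 1) "</target>"

def pvPick (lst : List String) (sequence : List String) (H : List Nat) (k : Int) : List String :=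
  if 1 ≤ k ∧ k ≤ (H.length : Int) then pvTagAt lst sequence (H.getD (k - 1).toNat 0) else lst

-- the value B builds when the k-th hit (of the hit list H) exists: slice splice at H[k-1]
def pvPickB (lst p : List String) (H : List Nat) (k : Int) : List String :=
  if 1 ≤ k ∧ k ≤ (H.length : Int) then
    PySem.List.slice lst none (some ((H.getD (k-1).toNat 0 : Nat) : Int)) ++ ["<target>"] ++
      PySem.List.slice lst (some ((H.getD (k-1).toNat 0 : Nat) : Int))
        (some (((H.getD (k-1).toNat 0 : Nat) : Int) + (p.length : Int))) ++ ["</target>"] ++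
      PySem.List.slice lst (some (((H.getD (k-1).toNat 0 : Nat) : Int) + (p.length : Int))) none
  else lst

theorem pvHitsFrom_le (lst sequence : List String) :
    ∀ i, ∀ j ∈ pvHitsFrom lst sequence i,
      i ≤ j ∧ (j : Int) ≤ (lst.length : Int) - (sequence.length : Int) := by
  intro i
  induction i using pvHitsFrom.induct lst sequence with
  | case1 i h ih =>
    intro j hj
    rw [pvHitsFrom, dif_pos h] at hj
    rcases List.mem_append.1 hj with hj | hj
    · split at hj
      · simp at hj; subst hj; exact ⟨le_refl _, h⟩
      · simp at hj
    · have := ih j hj; omega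
  | case2 i h =>
    intro j hj
    rw [pvHitsFrom, dif_neg h] at hj
    simp at hj

theorem pvHitsFrom_nil (lst p : List String) (j : Nat)
    (h : ¬((j : Int) ≤ (lst.length : Int) - (p.length : Int))) : pvHitsFrom lst p j = [] := by
  rw [pvHitsFrom, dif_neg h]

theorem pvTagAt_eq_splice (lst sequence : List String) (j : Nat)
    (hj : (j : Int) ≤ (lst.length : Int) - (sequence.length : Int)) :
    pvTagAt lst sequence j =
      lst.take j ++ ["<target>"] ++ (lst.drop j).take sequence.length ++ ["</target>"]
        ++ lst.drop (j + sequence.length) := by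
  have hjl : j ≤ lst.length := by omega
  have hcast : (j : Int) + (sequence.length : Int) + 1 = ((j + sequence.length + 1 : Nat) : Int) := by
    push_cast; ring
  rw [pvTagAt, PySem.List.insert_natCast lst j _ hjl, hcast,
    PySem.List.insert_natCast _ _ _ (by simp; omega)]
  rw [List.take_append, List.drop_append]
  have hlen : (List.take j lst).length = j := by simp; omega
  rw [hlen]
  have h1 : j + sequence.length + 1 - j = sequence.length + 1 := by omega
  rw [h1]
  have h2 : List.drop (j + sequence.length + 1) (List.take j lst) = [] :=
    List.drop_eq_nil_of_le (by simp; omega)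
  rw [h2]
  simp [List.take_take, List.drop_drop]
  omega

theorem pvALoop_eq_pick (lst sequence : List String) (occurrence : Int) :
    ∀ (count : Int) (i : Nat),
      pvALoop lst sequence occurrence count i =
        pvPick lst sequence (pvHitsFrom lst sequence i) (occurrence - count) := by
  intro count i
  induction count, i using pvALoop.induct lst sequence occurrence with
  | case1 count i h hm hc =>
    rw [pvALoop, dif_pos h, if_pos hm, if_pos hc]
    rw [pvHitsFrom, dif_pos h, if_pos hm]
    have hocc : occurrence - count = 1 := by simp at hc; omega
    rw [pvPick, if_pos (by rw [hocc]; exact ⟨le_refl 1, by simp only [List.singleton_append, List.length_cons]; omega⟩)]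
    rw [hocc]
    simp [pvTagAt]
  | case2 count i h hm hc ih =>
    rw [pvALoop, dif_pos h, if_pos hm, if_neg hc]
    rw [pvHitsFrom, dif_pos h, if_pos hm, ih]
    have hne : occurrence - count ≠ 1 := by simp at hc; omega
    unfold pvPick
    by_cases h1 : 1 ≤ occurrence - (count + 1) ∧
        occurrence - (count + 1) ≤ ((pvHitsFrom lst sequence (i + 1)).length : Int)
    · rw [if_pos h1, if_pos (by simp only [List.singleton_append, List.length_cons]; push_cast; omega)]
      congr 1
      have hk : (occurrence - count - 1).toNat = (occurrence - (count + 1) - 1).toNat + 1 := by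
        omega
      rw [hk, List.singleton_append, List.getD_cons_succ]
    · rw [if_neg h1, if_neg (by simp only [List.singleton_append, List.length_cons]; push_cast; omega)]
  | case3 count i h hm ih =>
    rw [pvALoop, dif_pos h, if_neg hm]
    rw [pvHitsFrom, dif_pos h, if_neg hm, ih]
    simp
  | case4 count i h =>
    rw [pvALoop, dif_neg h]
    rw [pvHitsFrom, dif_neg h]
    rw [pvPick, if_neg (by simp only [List.length_nil]; push_cast; omega)]

-- ---------- border (= matched-prefix-length) machinery for KMP ----------

-- longest j ≤ b such that the first j pattern symbols are a suffix of t
def pvFG (p t : List String) (b : Nat) : Nat :=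
  Nat.findGreatest (fun j => p.take j <:+ t) b

theorem pvFG_le (p t : List String) (b : Nat) : pvFG p t b ≤ b := Nat.findGreatest_le b

theorem pvFG_suffix (p t : List String) (b : Nat) : p.take (pvFG p t b) <:+ t :=
  Nat.findGreatest_spec (P := fun j => p.take j <:+ t) (Nat.zero_le b) (by simp)

theorem pvFG_ge {p t : List String} {b j : Nat} (hj : j ≤ b) (h : p.take j <:+ t) :
    j ≤ pvFG p t b := Nat.le_findGreatest hj h

theorem pvFG_eq {p t : List String} {b r : Nat} (hr : r ≤ b) (hP : p.take r <:+ t)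
    (hmax : ∀ j, p.take j <:+ t → j ≤ b → j ≤ r) : pvFG p t b = r :=
  le_antisymm (hmax _ (pvFG_suffix p t b) (pvFG_le p t b)) (pvFG_ge hr hP)

theorem pvFG_congr {p t u : List String} {b : Nat}
    (h : ∀ j, 0 < j → j ≤ b → (p.take j <:+ t ↔ p.take j <:+ u)) : pvFG p t b = pvFG p u b := by
  unfold pvFG
  induction b with
  | zero => rfl
  | succ b ih =>
    rw [Nat.findGreatest_succ, Nat.findGreatest_succ, ih (fun j hj hjb => h j hj (by omega))]
    by_cases hb : p.take (b+1) <:+ t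
    · rw [if_pos hb, if_pos ((h (b+1) (by omega) le_rfl).mp hb)]
    · rw [if_neg hb, if_neg (fun hc => hb ((h (b+1) (by omega) le_rfl).mpr hc))]

theorem pvSuffix_of_suffix_le {l₁ l₂ l₃ : List String} (h1 : l₁ <:+ l₃) (h2 : l₂ <:+ l₃)
    (h : l₁.length ≤ l₂.length) : l₁ <:+ l₂ := by
  rw [← List.reverse_prefix] at h1 h2 ⊢
  exact List.prefix_of_prefix_length_le h1 h2 (by simpa using h)

theorem pvSnoc_suffix_snoc {xs ys : List String} {a b : String} (h : xs ++ [a] <:+ ys ++ [b]) :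
    a = b ∧ xs <:+ ys := by
  rw [← List.reverse_prefix] at h
  simp only [List.reverse_append, List.reverse_singleton, List.singleton_append] at h
  rw [List.cons_prefix_cons] at h
  exact ⟨h.1, List.reverse_prefix.mp h.2⟩

theorem pvSuffix_snoc_of {xs ys : List String} {a : String} (h : xs <:+ ys) :
    xs ++ [a] <:+ ys ++ [a] := by
  obtain ⟨t, rfl⟩ := h
  exact ⟨t, by simp⟩

theorem pvTake_succ_eq {p : List String} {j : Nat} (h : j < p.length) :
    p.take (j+1) = p.take j ++ [p.getD j ""] := by
  rw [List.take_succ, List.getElem?_eq_getElem h, List.getD_eq_getElem p "" h]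
  rfl

-- a nonempty suffix of t ++ [c] that is a pattern prefix: peel the last symbol
theorem pvBorder_snoc {p t : List String} {c : String} {j : Nat} (h1 : 1 ≤ j)
    (hjm : j ≤ p.length) (h : p.take j <:+ t ++ [c]) :
    p.take (j-1) <:+ t ∧ p.getD (j-1) "" = c := by
  have hj : j - 1 < p.length := by omega
  have h' : p.take ((j-1)+1) <:+ t ++ [c] := by rw [show (j-1)+1 = j by omega]; exact h
  rw [pvTake_succ_eq hj] at h'
  obtain ⟨he, hs⟩ := pvSnoc_suffix_snoc h'
  exact ⟨hs, he⟩

theorem pvBorder_snoc_of {p t : List String} {c : String} {j : Nat} (h1 : 1 ≤ j)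
    (hjm : j ≤ p.length) (hs : p.take (j-1) <:+ t) (he : p.getD (j-1) "" = c) :
    p.take j <:+ t ++ [c] := by
  have hj : j - 1 < p.length := by omega
  have h' := pvSuffix_snoc_of (a := c) hs
  rw [show j = (j-1)+1 by omega, pvTake_succ_eq hj, he]
  exact h'

-- ---------- correctness of the inner while (+ extend-if) ----------

theorem pvKmpShift_spec (p : List String) (fail : List Nat) (c : String) (t : List String)
    (b : Nat) (hbm : b + 1 ≤ p.length) :
    ∀ k, ∀ fuel, k ≤ fuel → k ≤ b → p.take k <:+ t →
      (∀ j, p.take j <:+ t ++ [c] → j ≤ b + 1 → j ≤ k + 1) →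
      (∀ j, j < k → fail.getD j 0 = pvFG p (p.take (j+1)) j) →
      (if c == p.getD (pvKmpShift p fail c k fuel) "" then pvKmpShift p fail c k fuel + 1
        else pvKmpShift p fail c k fuel) = pvFG p (t ++ [c]) (b+1) := by
  intro k
  induction k using Nat.strong_induction_on with
  | _ k ih =>
    intro fuel hfuel hkb hkt hmax hfail
    have hexit : (if c == p.getD k "" then k + 1 else k) = pvFG p (t ++ [c]) (b+1) ∨
        (0 < k ∧ ¬(c == p.getD k "")) := by
      by_cases hcond : 0 < k ∧ ¬(c == p.getD k "")
      · exact Or.inr hcond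
      · left
        by_cases hc : c == p.getD k ""
        · rw [if_pos hc]
          refine (pvFG_eq (by omega) ?_ hmax).symm
          have he : p.getD k "" = c := (eq_of_beq hc).symm
          exact pvBorder_snoc_of (j := k+1) (by omega) (by omega) (by simpa using hkt)
            (by simpa using he)
        · rw [if_neg hc]
          have hk0 : k = 0 := by
            by_contra h0
            exact hc (not_not.mp (fun hnn => hcond ⟨Nat.pos_of_ne_zero h0, hnn⟩))
          subst hk0
          refine (pvFG_eq (Nat.zero_le _) (by simp) ?_).symm
          intro j hj hjb
          by_contra hj0
          have hj1 : 1 ≤ j := by omega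
          obtain ⟨hs, he⟩ := pvBorder_snoc hj1 (by omega) hj
          have hjle : j ≤ 0 + 1 := hmax j hj hjb
          have hjeq : j = 1 := by omega
          subst hjeq
          simp only [Nat.sub_self] at he
          exact hc (by rw [he.symm]; simp)
      -- done
    cases fuel with
    | zero =>
      have hk0 : k = 0 := by omega
      subst hk0
      rcases hexit with hx | hx
      · simpa only [pvKmpShift] using hx
      · exact absurd hx.1 (by omega)
    | succ f =>
      by_cases hcond : 0 < k ∧ ¬(c == p.getD k "")
      · have hstep : pvKmpShift p fail c k (f+1) = pvKmpShift p fail c (fail.getD (k-1) 0) f := by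
          simp only [pvKmpShift, if_pos hcond]
        have hk'v : fail.getD (k-1) 0 = pvFG p (p.take k) (k-1) := by
          rw [hfail (k-1) (by omega), show k-1+1 = k by omega]
        have hk'lt : fail.getD (k-1) 0 < k := by
          have := pvFG_le p (p.take k) (k-1); omega
        have hk't : p.take (fail.getD (k-1) 0) <:+ t := by
          have h1 : p.take (fail.getD (k-1) 0) <:+ p.take k := by
            rw [hk'v]; exact pvFG_suffix _ _ _
          exact h1.trans hkt
        have hmax' : ∀ j, p.take j <:+ t ++ [c] → j ≤ b + 1 → j ≤ fail.getD (k-1) 0 + 1 := by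
          intro j hj hjb
          rcases Nat.eq_zero_or_pos j with rfl | hj1
          · omega
          · obtain ⟨hs, he⟩ := pvBorder_snoc hj1 (by omega) hj
            have hjk : j ≤ k + 1 := hmax j hj hjb
            have hne : j - 1 ≠ k := by
              intro hek
              apply hcond.2
              rw [← hek, he]
              simp
            have hjk1 : j - 1 ≤ k - 1 := by omega
            have hsk : p.take (j-1) <:+ p.take k :=
              pvSuffix_of_suffix_le hs hkt (by simp only [List.length_take]; omega)
            have := pvFG_ge (b := k-1) hjk1 hsk
            omega
        rw [hstep]
        exact ih _ hk'lt f (by omega) (by omega) hk't hmax' (fun j hj => hfail j (by omega))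
      · have hstep : pvKmpShift p fail c k (f+1) = k := by
          simp only [pvKmpShift, if_neg hcond]
        rw [hstep]
        rcases hexit with hx | hx
        · exact hx
        · exact absurd hx hcond

theorem pvQ2_spec (p : List String) (fail : List Nat) (c : String) (t : List String)
    (b q : Nat) (hbm : b + 1 ≤ p.length) (hqb : q ≤ b) (hqt : p.take q <:+ t)
    (hmax : ∀ j, p.take j <:+ t ++ [c] → j ≤ b + 1 → j ≤ q + 1)
    (hfail : ∀ j, j < q → fail.getD j 0 = pvFG p (p.take (j+1)) j) :
    pvQ2 p fail c q = pvFG p (t ++ [c]) (b+1) := by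
  unfold pvQ2
  exact pvKmpShift_spec p fail c t b hbm q q le_rfl hqb hqt hmax hfail

-- ---------- correctness of the failure table ----------

theorem pvBuildFail_inv (p : List String) (hm : 1 ≤ p.length) :
    ∀ nsteps, nsteps ≤ p.length - 1 →
      ((List.range' 1 nsteps).foldl (pvBuildStep p) (List.replicate p.length 0, 0)).1.length = p.length ∧
      ((List.range' 1 nsteps).foldl (pvBuildStep p) (List.replicate p.length 0, 0)).2
        = pvFG p (p.take (nsteps+1)) nsteps ∧
      ∀ j, j ≤ nsteps →
        ((List.range' 1 nsteps).foldl (pvBuildStep p) (List.replicate p.length 0, 0)).1.getD j 0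
          = pvFG p (p.take (j+1)) j := by
  intro nsteps
  induction nsteps with
  | zero =>
    intro _
    refine ⟨by simp, by simp [pvFG], ?_⟩
    intro j hj
    have hj0 : j = 0 := by omega
    subst hj0
    simp only [List.range'_zero, List.foldl_nil, pvFG, List.getD_eq_getElem?_getD,
      List.getElem?_replicate]
    rw [if_pos (by omega)]
    rfl
  | succ n ih =>
    intro hn1
    obtain ⟨hlen, hsnd, hget⟩ := ih (by omega)
    have hq : 1 + n < p.length := by omega
    set st := (List.range' 1 n).foldl (pvBuildStep p) (List.replicate p.length 0, 0) with hst
    have hk2 : pvQ2 p st.1 (p.getD (1+n) "") st.2 = pvFG p (p.take ((1+n)+1)) (n+1) := by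
      have ht : p.take ((1+n)+1) = p.take (1+n) ++ [p.getD (1+n) ""] := pvTake_succ_eq hq
      have hres := pvQ2_spec p st.1 (p.getD (1+n) "") (p.take (1+n)) n st.2
        (by omega)
        (by rw [hsnd]; exact pvFG_le _ _ _)
        (by rw [hsnd, show (1:Nat)+n = n+1 by omega]; exact pvFG_suffix _ _ _)
        (by
          intro j hj hjb
          rcases Nat.eq_zero_or_pos j with rfl | hj1
          · omega
          · obtain ⟨hs, _⟩ := pvBorder_snoc hj1 (by omega) hj
            have : j - 1 ≤ pvFG p (p.take (n+1)) n := by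
              apply pvFG_ge (by omega)
              rw [show n+1 = 1+n by omega]
              exact hs
            omega)
        (fun j hj => hget j (by have := pvFG_le p (p.take (n+1)) n; omega))
      rw [hres, ← ht]
    have hfold : (List.range' 1 (n+1)).foldl (pvBuildStep p) (List.replicate p.length 0, 0)
        = (st.1.set (1+n) (pvQ2 p st.1 (p.getD (1+n) "") st.2),
            pvQ2 p st.1 (p.getD (1+n) "") st.2) := by
      rw [List.range'_1_concat, List.foldl_append, ← hst]
      simp only [List.foldl_cons, List.foldl_nil, pvBuildStep]
    rw [hfold]
    refine ⟨by simp [hlen], by rw [hk2, show (1:Nat)+n+1 = n+1+1 by omega], ?_⟩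
    intro j hj
    rw [List.getD_eq_getElem?_getD, List.getElem?_set]
    by_cases hje : 1 + n = j
    · rw [if_pos hje, if_pos (by omega)]
      subst hje
      simp only [Option.getD_some]
      rw [hk2, show (1:Nat)+n = n+1 by omega]
    · rw [if_neg hje, ← List.getD_eq_getElem?_getD]
      exact hget j (by omega)

theorem pvBuildFail_spec (p : List String) (hm : 1 ≤ p.length) :
    ∀ j, j < p.length → (pvBuildFail p).getD j 0 = pvFG p (p.take (j+1)) j := by
  intro j hj
  exact (pvBuildFail_inv p hm (p.length - 1) le_rfl).2.2 j (by omega)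

-- ---------- correctness of the main scan ----------

theorem pvPickB_cons (lst p : List String) (s : Nat) (T : List Nat) (k : Int) (hk : k ≠ 1) :
    pvPickB lst p (s :: T) k = pvPickB lst p T (k - 1) := by
  unfold pvPickB
  by_cases h : 1 ≤ k - 1 ∧ k - 1 ≤ (T.length : Int)
  · rw [if_pos h, if_pos (by refine ⟨by omega, ?_⟩; simp only [List.length_cons]; push_cast; omega)]
    have hidx : (k-1).toNat = (k-1-1).toNat + 1 := by omega
    rw [hidx, List.getD_cons_succ]
  · rw [if_neg h, if_neg (by
      intro hc
      apply h
      simp only [List.length_cons] at hc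
      push_cast at hc ⊢
      omega)]

theorem pvKmpLoop_eq (lst p : List String) (occ : Int) (hm : 1 ≤ p.length) :
    ∀ d i q count, lst.length - i = d → i ≤ lst.length →
      q = pvFG p (lst.take i) (p.length - 1) →
      pvKmpLoop lst p (pvBuildFail p) occ i q count
        = pvPickB lst p (pvHitsFrom lst p (i + 1 - p.length)) (occ - count) := by
  intro d
  induction d using Nat.strong_induction_on with
  | _ d ih =>
    intro i q count hd hin hq
    by_cases hi : i < lst.length
    · -- one scan step
      have hqt : p.take q <:+ lst.take i := by rw [hq]; exact pvFG_suffix _ _ _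
      have htc : lst.take i ++ [lst.getD i ""] = lst.take (i+1) := (pvTake_succ_eq hi).symm
      have hq2 : pvQ2 p (pvBuildFail p) (lst.getD i "") q = pvFG p (lst.take (i+1)) p.length := by
        have hres := pvQ2_spec p (pvBuildFail p) (lst.getD i "") (lst.take i) (p.length - 1) q
          (by omega)
          (by rw [hq]; exact pvFG_le _ _ _)
          hqt
          (by
            intro j hj hjb
            rcases Nat.eq_zero_or_pos j with rfl | hj1
            · omega
            · obtain ⟨hs, _⟩ := pvBorder_snoc hj1 (by omega) hj
              have hle := pvFG_ge (b := p.length - 1) (by omega) hs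
              rw [← hq] at hle
              omega)
          (fun j hj => pvBuildFail_spec p hm j (by
            have hqle := pvFG_le p (lst.take i) (p.length - 1)
            rw [← hq] at hqle
            omega))
        rw [htc, show p.length - 1 + 1 = p.length by omega] at hres
        exact hres
      have hstep : pvKmpLoop lst p (pvBuildFail p) occ i q count =
          (if pvQ2 p (pvBuildFail p) (lst.getD i "") q == p.length then
            (if count + 1 == occ then
              PySem.List.slice lst none (some ((i : Int) - (p.length : Int) + 1)) ++ ["<target>"] ++
                PySem.List.slice lst (some ((i : Int) - (p.length : Int) + 1))
                  (some ((i : Int) - (p.length : Int) + 1 + (p.length : Int))) ++ ["</target>"] ++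
                PySem.List.slice lst (some ((i : Int) - (p.length : Int) + 1 + (p.length : Int))) none
            else pvKmpLoop lst p (pvBuildFail p) occ (i+1) ((pvBuildFail p).getD (p.length - 1) 0) (count + 1))
          else pvKmpLoop lst p (pvBuildFail p) occ (i+1) (pvQ2 p (pvBuildFail p) (lst.getD i "") q) count) := by
        rw [pvKmpLoop, dif_pos hi]
      rw [hstep, hq2]
      set M := pvFG p (lst.take (i+1)) p.length with hM
      by_cases hMm : M = p.length
      · rw [if_pos (by simp [hMm])]
        have hPm : p <:+ lst.take (i+1) := by
          have hsf := pvFG_suffix p (lst.take (i+1)) p.length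
          rw [← hM, hMm, List.take_length] at hsf
          exact hsf
        have hmi : p.length ≤ i + 1 := by
          have hl := hPm.length_le
          simp at hl
          omega
        set s := i + 1 - p.length with hs
        have hsm : s + p.length = i + 1 := by omega
        have hslice : (lst.drop s).take p.length = p := by
          have h1 : p = List.drop ((lst.take (i+1)).length - p.length) (lst.take (i+1)) :=
            List.suffix_iff_eq_drop.mp hPm
          rw [List.length_take, show min (i+1) lst.length - p.length = s by omega,
            List.drop_take, show i + 1 - s = p.length by omega] at h1
          exact h1.symm
        have hhit : (PySem.List.slice lst (some (s:Int)) (some ((s:Int) + (p.length:Int))) == p) = true := by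
          rw [PySem.List.slice_natCast_add]
          simp [hslice]
        have hsn : (s : Int) ≤ (lst.length : Int) - (p.length : Int) := by omega
        have hhits : pvHitsFrom lst p s = s :: pvHitsFrom lst p (s+1) := by
          rw [pvHitsFrom, dif_pos hsn, if_pos hhit, List.singleton_append]
        by_cases hocc : count + 1 = occ
        · rw [if_pos (by simpa using hocc)]
          rw [hhits, pvPickB, if_pos (by refine ⟨by omega, ?_⟩; simp only [List.length_cons]; push_cast; omega)]
          have hidx : (occ - count - 1).toNat = 0 := by omega
          rw [hidx, List.getD_cons_zero,
            show (i : Int) - (p.length : Int) + 1 = (s : Int) by omega]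
        · rw [if_neg (by simpa using hocc)]
          have hfq : (pvBuildFail p).getD (p.length - 1) 0 = pvFG p (lst.take (i+1)) (p.length - 1) := by
            rw [pvBuildFail_spec p hm (p.length - 1) (by omega),
              show p.length - 1 + 1 = p.length by omega, List.take_length]
            apply pvFG_congr
            intro j hj hjb
            constructor
            · intro hsf; exact hsf.trans hPm
            · intro hsf
              apply pvSuffix_of_suffix_le hsf hPm
              simp only [List.length_take]
              omega
          rw [ih (lst.length - (i+1)) (by omega) (i+1) _ (count+1) rfl (by omega) hfq]
          rw [show i + 1 + 1 - p.length = s + 1 by omega,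
            show occ - (count + 1) = (occ - count) - 1 by ring,
            ← pvPickB_cons lst p s _ (occ - count) (by omega), ← hhits]
      · rw [if_neg (by simpa using hMm)]
        have hPm : ¬ (p <:+ lst.take (i+1)) := by
          intro hPm
          apply hMm
          have h1 : p.length ≤ pvFG p (lst.take (i+1)) p.length :=
            pvFG_ge le_rfl (by rw [List.take_length]; exact hPm)
          have h2 := pvFG_le p (lst.take (i+1)) p.length
          rw [← hM] at h1 h2
          omega
        have hstep2 : pvFG p (lst.take (i+1)) ((p.length - 1) + 1) = pvFG p (lst.take (i+1)) (p.length - 1) := by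
          unfold pvFG
          rw [Nat.findGreatest_succ,
            if_neg (by rw [show p.length - 1 + 1 = p.length by omega, List.take_length]; exact hPm)]
        have hq2' : M = pvFG p (lst.take (i+1)) (p.length - 1) := by
          rw [← hstep2, hM, show p.length - 1 + 1 = p.length by omega]
        have hhits : pvHitsFrom lst p (i + 1 + 1 - p.length) = pvHitsFrom lst p (i + 1 - p.length) := by
          by_cases hmi : p.length ≤ i + 1
          · set s := i + 1 - p.length with hs
            have hsm : s + p.length = i + 1 := by omega
            by_cases hsn : (s : Int) ≤ (lst.length : Int) - (p.length : Int)
            · have hnohit : (PySem.List.slice lst (some (s:Int)) (some ((s:Int)+(p.length:Int))) == p) = false := by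
                rw [PySem.List.slice_natCast_add]
                simp only [beq_eq_false_iff_ne, ne_eq]
                intro heq
                apply hPm
                refine ⟨lst.take s, ?_⟩
                rw [← heq, ← List.take_add, hsm]
              have haux : pvHitsFrom lst p s = pvHitsFrom lst p (s+1) := by
                rw [pvHitsFrom, dif_pos hsn, hnohit]
                simp
              rw [show i + 1 + 1 - p.length = s + 1 by omega, ← haux]
            · rw [pvHitsFrom_nil lst p s hsn, pvHitsFrom_nil lst p (i+1+1-p.length) (by omega)]
          · rw [show i + 1 + 1 - p.length = i + 1 - p.length by omega]
        rw [ih (lst.length - (i+1)) (by omega) (i+1) M count rfl (by omega) hq2', hhits]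
    · rw [pvKmpLoop, dif_neg hi]
      have hnil : pvHitsFrom lst p (i + 1 - p.length) = [] := by
        apply pvHitsFrom_nil
        omega
      rw [hnil, pvPickB, if_neg (by
        intro hcn
        simp only [List.length_nil, Nat.cast_zero] at hcn
        omega)]

-- ---------- assembling the two sides ----------

theorem pvPick_eq_pickB (lst p : List String) (H : List Nat) (k : Int)
    (hH : ∀ s ∈ H, (s : Int) ≤ (lst.length : Int) - (p.length : Int)) :
    pvPick lst p H k = pvPickB lst p H k := by
  unfold pvPick pvPickB
  by_cases hc : 1 ≤ k ∧ k ≤ (H.length : Int)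
  · rw [if_pos hc, if_pos hc]
    have hidx : (k-1).toNat < H.length := by omega
    have hmem : H.getD (k-1).toNat 0 ∈ H := by
      rw [List.getD_eq_getElem _ _ hidx]
      exact List.getElem_mem hidx
    have hs := hH _ hmem
    rw [pvTagAt_eq_splice lst p _ hs]
    rw [PySem.List.slice_to_natCast, PySem.List.slice_natCast_add]
    rw [show ((H.getD (k-1).toNat 0 : Nat) : Int) + (p.length : Int)
        = ((H.getD (k-1).toNat 0 + p.length : Nat) : Int) by push_cast; ring]
    rw [PySem.List.slice_from_natCast]
  · rw [if_neg hc, if_neg hc]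

theorem pvHitsFrom_nilseq (lst : List String) :
    ∀ i, pvHitsFrom lst [] i = List.range' i (lst.length + 1 - i) := by
  intro i
  induction i using pvHitsFrom.induct lst [] with
  | case1 i h ih =>
    rw [pvHitsFrom, dif_pos h]
    have hcond : (PySem.List.slice lst (some (i:Int))
        (some ((i:Int) + (([]:List String).length : Int))) == ([]:List String)) = true := by
      simp [PySem.List.slice_natCast]
    rw [if_pos hcond, ih]
    have hi : i ≤ lst.length := by simp at h; omega
    rw [show lst.length + 1 - i = (lst.length - i) + 1 by omega, List.range'_succ]
    simp [show lst.length + 1 - (i+1) = lst.length - i by omega]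
  | case2 i h =>
    rw [pvHitsFrom, dif_neg h]
    have h0 : lst.length + 1 - i = 0 := by simp at h; omega
    rw [h0, List.range'_zero]

theorem pvPorts_agree (lst sequence : List String) (occurrence : Int) :
    insert_tags_around_sequence lst sequence occurrence
      = insert_tags_around_sequence_alt lst sequence occurrence := by
  by_cases hm0 : sequence.length = 0
  · have hp : sequence = [] := by
      cases sequence with
      | nil => rfl
      | cons a t => simp at hm0
    subst hp
    unfold insert_tags_around_sequence insert_tags_around_sequence_alt
    rw [pvALoop_eq_pick, pvHitsFrom_nilseq, if_pos (by simp)]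
    simp only [sub_zero, Nat.sub_zero]
    by_cases hc : 1 ≤ occurrence ∧ occurrence ≤ (lst.length : Int) + 1
    · rw [if_pos hc, pvPick, if_pos (by
        refine ⟨hc.1, ?_⟩
        simp only [List.length_range']
        push_cast
        omega)]
      have hidx : (occurrence - 1).toNat < (List.range' 0 (lst.length + 1)).length := by
        simp only [List.length_range']
        omega
      rw [List.getD_eq_getElem _ _ hidx, List.getElem_range']
      simp only [one_mul, zero_add]
      rw [pvTagAt_eq_splice lst [] _ (by simp; omega)]
      rw [show occurrence - 1 = (((occurrence - 1).toNat : Nat) : Int) by omega,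
        PySem.List.slice_to_natCast, PySem.List.slice_from_natCast]
      simp
    · rw [if_neg hc, pvPick, if_neg (by
        intro hcn
        apply hc
        obtain ⟨h1, h2⟩ := hcn
        simp only [List.length_range'] at h2
        push_cast at h2
        exact ⟨h1, by omega⟩)]
  · have hm : 1 ≤ sequence.length := by omega
    unfold insert_tags_around_sequence insert_tags_around_sequence_alt
    rw [pvALoop_eq_pick, if_neg (by simpa using hm0)]
    have hq0 : pvFG sequence (lst.take 0) (sequence.length - 1) = 0 := by
      unfold pvFG
      rw [Nat.findGreatest_eq_zero_iff]
      intro j hj hjb hsuf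
      rw [List.take_zero, List.suffix_nil] at hsuf
      have hlen := congrArg List.length hsuf
      simp only [List.length_take, List.length_nil] at hlen
      omega
    have hloop := pvKmpLoop_eq lst sequence occurrence hm lst.length 0 0 0 rfl
      (by omega) hq0.symm
    rw [hloop, show (0:Nat) + 1 - sequence.length = 0 by omega, sub_zero]
    exact pvPick_eq_pickB lst sequence _ occurrence
      (fun s hs => (pvHitsFrom_le lst sequence 0 s hs).2)

-- ===== VERDICT (by name: the statement is the Claim_ definition above) =====
theorem insert_tags_around_sequence_spec : Claim_equal_insert_tags_around_sequence := by
  intro lst sequence occurrence _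
  unfold Spec_insert_tags_around_sequence
  exact pvPorts_agree lst sequence occurrence
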